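-- pv_equiv track=rewrite | github.com/Auto-Mech/mechdriver | mechroutines/pf/models/_sym.py | _modify_idxs
-- ===== SOURCE A (Python) =====
-- def _modify_idxs(idxs_lst, removed_atms, dummy_atms):
--     mod_idxs_lst = []
--     no_dummy_idxs_lst = []
--     for idxs in idxs_lst:
--         mod_idxs = []
--         for idx in idxs:
--             mod_idx = idx
--             for atm in dummy_atms:
--                 if atm < idx:
--                     mod_idx -= 1
--             mod_idxs.append(mod_idx)
--         no_dummy_idxs_lst.append(mod_idxs)
--
--     for idxs in no_dummy_idxs_lst:
--         in_lst = True
--         for idx in idxs: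
--             if idx in removed_atms:
--                 in_lst = False
--         if in_lst:
--             mod_idxs = []
--             for idx in idxs:
--                 mod_idx = idx
--                 for atm in removed_atms:
--                     if atm < idx:
--                         mod_idx -= 1
--                 mod_idxs.append(mod_idx)
--             mod_idxs_lst.append(mod_idxs)
--     return mod_idxs_lst
-- ===== SOURCE B (Python) =====
-- def _bisect_left(a, x):
--     # hand-written bisect_left (no imports in the original module)
--     lo, hi = 0, len(a)
--     while lo < hi:
--         mid = (lo + hi) // 2
--         if a[mid] < x:
--             lo = mid + 1
--         else:
--             hi = mid
--     return lo
--
--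
-- def _modify_idxs(idxs_lst, removed_atms, dummy_atms):
--     sd = sorted(dummy_atms)
--     sr = sorted(removed_atms)
--     rset = set(removed_atms)
--     out = []
--     for idxs in idxs_lst:
--         shifted = [i - _bisect_left(sd, i) for i in idxs]
--         if all(j not in rset for j in shifted):
--             out.append([j - _bisect_left(sr, j) for j in shifted])
--     return out
-- ===== Notes on version B (the rewrite author's own statement) =====
-- stated objective: faster
-- what changed: Replaces the per-index linear scans over dummy/removed atoms by binary search (hand-written bisect_left) on sorted copies, replaces the inner membership scan by a set, and fuses the two passes into one filtered pass.
import Mathlib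
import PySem

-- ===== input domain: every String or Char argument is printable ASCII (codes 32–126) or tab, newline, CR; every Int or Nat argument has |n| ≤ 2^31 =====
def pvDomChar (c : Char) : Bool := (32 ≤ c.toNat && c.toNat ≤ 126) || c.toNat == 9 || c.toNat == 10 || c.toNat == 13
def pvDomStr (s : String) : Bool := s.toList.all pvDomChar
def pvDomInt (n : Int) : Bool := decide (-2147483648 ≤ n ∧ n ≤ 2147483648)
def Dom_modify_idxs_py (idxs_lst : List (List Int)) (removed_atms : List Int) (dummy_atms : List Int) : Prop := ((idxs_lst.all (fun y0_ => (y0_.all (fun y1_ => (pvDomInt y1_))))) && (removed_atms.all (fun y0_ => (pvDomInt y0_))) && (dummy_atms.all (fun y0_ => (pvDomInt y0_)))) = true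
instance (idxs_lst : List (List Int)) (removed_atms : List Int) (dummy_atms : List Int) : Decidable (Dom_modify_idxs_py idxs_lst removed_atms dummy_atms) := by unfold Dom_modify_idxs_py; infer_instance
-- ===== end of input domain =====

-- B replaces A's per-index linear scans with binary search on sorted copies and a set
-- membership test, fusing A's two passes into one (objective: faster; return value only).


-- ===== PORT A =====
def modify_idxs_py (idxs_lst : List (List Int)) (removed_atms : List Int) (dummy_atms : List Int) : List (List Int) :=
  let no_dummy_idxs_lst : List (List Int) :=
    idxs_lst.foldl (fun acc idxs =>
      acc ++ [idxs.foldl (fun mod_idxs idx =>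
        mod_idxs ++ [dummy_atms.foldl (fun m atm => if atm < idx then m - 1 else m) idx]) []]) []
  no_dummy_idxs_lst.foldl (fun mod_idxs_lst idxs =>
    let in_lst := idxs.foldl (fun b idx => if removed_atms.contains idx then false else b) true
    if in_lst then
      mod_idxs_lst ++ [idxs.foldl (fun mod_idxs idx =>
        mod_idxs ++ [removed_atms.foldl (fun m atm => if atm < idx then m - 1 else m) idx]) []]
    else mod_idxs_lst) []

-- ===== PORT B =====
-- hand-written bisect_left from Source B, transcribed: while lo < hi loop
def pvBisectLoop (a : List Int) (x : Int) (lo hi : Nat) : Nat :=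
  if _h : lo < hi then
    let mid := (lo + hi) / 2
    if a.getD mid 0 < x then pvBisectLoop a x (mid + 1) hi
    else pvBisectLoop a x lo mid
  else lo
termination_by hi - lo
decreasing_by all_goals omega

def pvBisect (a : List Int) (x : Int) : Nat := pvBisectLoop a x 0 a.length

def modify_idxs_py_alt (idxs_lst : List (List Int)) (removed_atms : List Int) (dummy_atms : List Int) : List (List Int) :=
  let sd := PySem.List.sorted dummy_atms (fun v => v) false
  let sr := PySem.List.sorted removed_atms (fun v => v) false
  let rset := PySem.Set.ofList removed_atms
  idxs_lst.flatMap (fun idxs =>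
    let shifted := idxs.map (fun i => i - (pvBisect sd i : Int))
    if shifted.all (fun j => !(rset.contains j)) then
      [shifted.map (fun j => j - (pvBisect sr j : Int))]
    else [])

-- ===== PRECONDITION & SPEC =====
def Spec_modify_idxs_py (idxs_lst : List (List Int)) (removed_atms : List Int) (dummy_atms : List Int) (out : List (List Int)) : Prop := out = modify_idxs_py_alt idxs_lst removed_atms dummy_atms
instance (idxs_lst : List (List Int)) (removed_atms : List Int) (dummy_atms : List Int) (out : List (List Int)) : Decidable (Spec_modify_idxs_py idxs_lst removed_atms dummy_atms out) := by unfold Spec_modify_idxs_py; infer_instance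

-- ===== CLAIM (what is proved, stated in full; the proofs are below) =====
def Claim_equal_modify_idxs_py : Prop := ∀ (idxs_lst : List (List Int)) (removed_atms : List Int) (dummy_atms : List Int), Dom_modify_idxs_py idxs_lst removed_atms dummy_atms → Spec_modify_idxs_py idxs_lst removed_atms dummy_atms (modify_idxs_py idxs_lst removed_atms dummy_atms)

-- ===== LEMMAS AND PROOFS =====

-- A's decrement loop subtracts the number of atoms strictly below idx
lemma foldl_sub_count (l : List Int) (i : Int) (c : Int) :
    l.foldl (fun m atm => if atm < i then m - 1 else m) c
      = c - (l.countP (fun atm => decide (atm < i)) : Int) := by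
  induction l generalizing c with
  | nil => simp
  | cons a t ih =>
    simp only [List.foldl_cons, List.countP_cons, ih]
    by_cases h : a < i
    · simp [h]
      omega
    · simp [h]

-- A's in_lst loop is an all-check
lemma foldl_in_lst (l : List Int) (r : List Int) (b : Bool) :
    l.foldl (fun b idx => if r.contains idx then false else b) b
      = (b && l.all (fun idx => !r.contains idx)) := by
  induction l generalizing b with
  | nil => simp
  | cons a t ih =>
    by_cases h : r.contains a
    · rw [List.foldl_cons, if_pos h, ih]
      simp only [Bool.false_and, List.all_cons, h, Bool.not_true, Bool.and_false]
    · have h2 : a ∉ r := by simpa using h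
      rw [List.foldl_cons, if_neg h, ih]
      simp [h2]

-- in a ≤-sorted list, the elements < x are exactly the first countP-many
lemma sorted_lt_iff (a : List Int) (x : Int) (hs : a.Pairwise (· ≤ ·)) :
    ∀ (k : Nat) (hk : k < a.length),
      (a[k] < x ↔ k < a.countP (fun y => decide (y < x))) := by
  induction a with
  | nil => intro k hk; simp at hk
  | cons b t ih =>
    intro k hk
    have hb := (List.pairwise_cons.mp hs).1
    have ht := (List.pairwise_cons.mp hs).2
    by_cases hbx : b < x
    · cases k with
      | zero => simp [hbx]
      | succ k =>
        have hk' : k < t.length := by simpa using hk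
        have := ih ht k hk'
        simp only [List.getElem_cons_succ, List.countP_cons, hbx]
        simpa [Nat.succ_lt_succ_iff] using this
    · -- x ≤ b ≤ every element of t: nothing is < x
      have hcount : t.countP (fun y => decide (y < x)) = 0 := by
        rw [List.countP_eq_zero]
        intro y hy
        have := hb y hy
        simp only [decide_eq_true_eq]
        omega
      cases k with
      | zero => simp [hbx, hcount]
      | succ k =>
        have hk' : k < t.length := by simpa using hk
        have hy : ¬ t[k] < x := by
          have := hb t[k] (List.getElem_mem hk')
          omega
        simp [hbx, hcount, hy]

-- the binary search returns countP (· < x) on a sorted list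
lemma pvBisectLoop_eq (a : List Int) (x : Int) (hs : a.Pairwise (· ≤ ·)) :
    ∀ (n lo hi : Nat), hi - lo ≤ n → lo ≤ a.countP (fun y => decide (y < x)) →
      a.countP (fun y => decide (y < x)) ≤ hi → hi ≤ a.length →
      pvBisectLoop a x lo hi = a.countP (fun y => decide (y < x)) := by
  intro n
  induction n with
  | zero =>
    intro lo hi hn hlo hhi hlen
    rw [pvBisectLoop]
    have h : ¬ lo < hi := by omega
    simp only [h, dif_neg, not_false_iff]
    omega
  | succ n ih =>
    intro lo hi hn hlo hhi hlen
    rw [pvBisectLoop]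
    by_cases h : lo < hi
    · simp only [h, dif_pos]
      set c := a.countP (fun y => decide (y < x)) with hc
      have hmidlt : (lo + hi) / 2 < hi := by omega
      have hmidge : lo ≤ (lo + hi) / 2 := by omega
      have hmlen : (lo + hi) / 2 < a.length := by omega
      have hget : a.getD ((lo + hi) / 2) 0 = a[(lo + hi) / 2] := List.getD_eq_getElem a 0 hmlen
      have hchar := sorted_lt_iff a x hs ((lo + hi) / 2) hmlen
      by_cases hm : a[(lo + hi) / 2] < x
      · have hlt : (lo + hi) / 2 < c := hchar.mp hm
        rw [hget, if_pos hm]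
        exact ih _ _ (by omega) (by omega) (by omega) hlen
      · have hge : c ≤ (lo + hi) / 2 := by
          by_contra hcon
          exact hm (hchar.mpr (by omega))
        rw [hget, if_neg hm]
        exact ih _ _ (by omega) (by omega) (by omega) (by omega)
    · simp only [h, dif_neg, not_false_iff]
      omega

lemma pvBisect_sorted (l : List Int) (x : Int) :
    (pvBisect (PySem.List.sorted l (fun v => v) false) x : Int)
      = (l.countP (fun y => decide (y < x)) : Int) := by
  have hs : (PySem.List.sorted l (fun v => v) false).Pairwise (· ≤ ·) := by
    simpa using PySem.List.sorted_pairwise l (fun v => v)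
  have hperm := PySem.List.sorted_perm l (fun v => v) false
  have hcp : (PySem.List.sorted l (fun v => v) false).countP (fun y => decide (y < x))
      = l.countP (fun y => decide (y < x)) := hperm.countP_eq _
  unfold pvBisect
  rw [pvBisectLoop_eq _ x hs _ 0 _ le_rfl (Nat.zero_le _) List.countP_le_length le_rfl, hcp]

-- flatMap over "if p then [f x] else []" is filter-then-map
lemma flatMap_if_singleton {α β : Type} (p : α → Bool) (f : α → β) (l : List α) :
    l.flatMap (fun x => if p x then [f x] else []) = (l.filter p).map f := by
  induction l with
  | nil => rfl
  | cons a t ih => by_cases h : p a <;> simp [h, ih]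

-- membership in the set built from a list is membership in the list
lemma contains_ofList (r : List Int) (j : Int) : (PySem.Set.ofList r).contains j = r.contains j := by
  apply Bool.eq_iff_iff.mpr
  rw [PySem.Set.contains_iff, List.contains_iff_mem]
  exact PySem.Set.mem_ofList r j

theorem modify_idxs_py_eq_alt (idxs_lst : List (List Int)) (removed_atms : List Int) (dummy_atms : List Int) :
    modify_idxs_py idxs_lst removed_atms dummy_atms = modify_idxs_py_alt idxs_lst removed_atms dummy_atms := by
  unfold modify_idxs_py modify_idxs_py_alt
  -- normalise A: append-loops become map / filter-map
  simp only [PySem.List.foldl_append_singleton_eq_map, PySem.List.foldl_append_if,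
    List.nil_append]
  -- normalise B: flatMap becomes filter-map, set membership becomes list membership
  rw [flatMap_if_singleton]
  -- identify the per-element shift functions on both sides
  have hf : ∀ (r : List Int), (fun idx => r.foldl (fun m atm => if atm < idx then m - 1 else m) idx)
      = (fun i => i - (pvBisect (PySem.List.sorted r (fun v => v) false) i : Int)) := by
    intro r; funext i
    rw [foldl_sub_count, pvBisect_sorted]
  rw [hf removed_atms, hf dummy_atms]
  simp only [List.filter_map, List.map_map, Function.comp_def, foldl_in_lst, Bool.true_and,
    contains_ofList]

-- ===== VERDICT (by name: the statement is the Claim_ definition above) =====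
theorem modify_idxs_py_spec : Claim_equal_modify_idxs_py := by
  intro idxs_lst removed_atms dummy_atms _
  unfold Spec_modify_idxs_py
  exact modify_idxs_py_eq_alt idxs_lst removed_atms dummy_atms
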